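-- pv_equiv track=rewrite | github.com/Quantum-Detectors/pyxspress | src/pyxspress/create_config/modules/create_proc_serv_ioc.py | _post_IOC
-- ===== SOURCE A (Python) =====
-- def _post_IOC(num_cards):
--     post_IOC_string = 'dbpf "XSP-ODN-01:IOCNAME" "Odin server"\n'
--     post_IOC_string += 'dbpf "XSP-ODN-02:IOCNAME" "Odin meta writer"\n'
--     post_IOC_string += 'dbpf "XSP-ODN-03:IOCNAME" "Odin control server"\n'
--     post_IOC_string += 'dbpf "XSP-ODN-04:IOCNAME" "Odin live view"\n'
--     for i in range(num_cards):
--         post_IOC_string += (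
--             f'dbpf "XSP-ODN-{(i * 2) + 5:02d}:IOCNAME" "Odin frame receiver {i + 1}"\n'
--         )
--         post_IOC_string += (
--             f'dbpf "XSP-ODN-{(i * 2) + 6:02d}:IOCNAME" "Odin frame processor {i + 1}"\n'
--         )
--     post_IOC_string += 'dbpf "XSPRESS:IOCNAME" "Xspress ADOdin"'
--
--     return post_IOC_string
-- ===== SOURCE B (Python) =====
-- def _post_IOC(num_cards):
--     descriptions = [
--         "Odin server",
--         "Odin meta writer",
--         "Odin control server",
--         "Odin live view",
--     ]
--     for k in range(1, num_cards + 1):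
--         descriptions.append(f"Odin frame receiver {k}")
--         descriptions.append(f"Odin frame processor {k}")
--     lines = [
--         f'dbpf "XSP-ODN-{n:02d}:IOCNAME" "{desc}"'
--         for n, desc in enumerate(descriptions, start=1)
--     ]
--     lines.append('dbpf "XSPRESS:IOCNAME" "Xspress ADOdin"')
--     return "\n".join(lines)
-- ===== Notes on version B (the rewrite author's own statement) =====
-- stated objective: simpler
-- what changed: Replaces A's interleaved string += loop with per-card index arithmetic (i*2+5 / i*2+6) by building a flat list of descriptions and emitting every numbered line in one uniform enumerate(start=1) formatting pass joined with '\n'.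
import Mathlib
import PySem

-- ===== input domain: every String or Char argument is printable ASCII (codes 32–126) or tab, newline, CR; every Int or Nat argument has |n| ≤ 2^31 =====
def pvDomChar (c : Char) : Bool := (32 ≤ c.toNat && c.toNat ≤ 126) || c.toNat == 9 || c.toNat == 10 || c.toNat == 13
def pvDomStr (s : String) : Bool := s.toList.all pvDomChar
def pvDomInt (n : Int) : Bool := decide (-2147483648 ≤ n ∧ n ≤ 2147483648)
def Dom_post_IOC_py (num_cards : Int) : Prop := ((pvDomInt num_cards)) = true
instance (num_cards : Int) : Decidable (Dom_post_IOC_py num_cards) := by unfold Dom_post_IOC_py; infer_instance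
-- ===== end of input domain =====

set_option maxRecDepth 8192


-- B replaces A's interleaved `+=` / index-arithmetic loop by a description table followed by one
-- uniform enumerate-and-format pass joined with '\n' (objective: simpler decomposition, same cost).

-- f'{n:02d}' for an int n: str(n) zero-padded to width 2 (sign stays in front) — exact via zfill
def pyFmt02 (n : Int) : String := PySem.Str.zfill (PySem.Int.toStr n) 2

-- ===== PORT A =====
def post_IOC_py (num_cards : Int) : String :=
  let s := "dbpf \"XSP-ODN-01:IOCNAME\" \"Odin server\"\n"
  let s := s ++ "dbpf \"XSP-ODN-02:IOCNAME\" \"Odin meta writer\"\n"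
  let s := s ++ "dbpf \"XSP-ODN-03:IOCNAME\" \"Odin control server\"\n"
  let s := s ++ "dbpf \"XSP-ODN-04:IOCNAME\" \"Odin live view\"\n"
  let s := (PySem.List.pyRange 0 num_cards 1).foldl
    (fun acc i =>
      (acc ++ ("dbpf \"XSP-ODN-" ++ pyFmt02 (i * 2 + 5) ++ ":IOCNAME\" \"Odin frame receiver "
        ++ PySem.Int.toStr (i + 1) ++ "\"\n"))
      ++ ("dbpf \"XSP-ODN-" ++ pyFmt02 (i * 2 + 6) ++ ":IOCNAME\" \"Odin frame processor "
        ++ PySem.Int.toStr (i + 1) ++ "\"\n")) s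
  s ++ "dbpf \"XSPRESS:IOCNAME\" \"Xspress ADOdin\""

-- ===== PORT B =====
def post_IOC_py_alt (num_cards : Int) : String :=
  let descs : List String :=
    ["Odin server", "Odin meta writer", "Odin control server", "Odin live view"]
  let descs := (PySem.List.pyRange 1 (num_cards + 1) 1).foldl
    (fun acc k => acc ++ ["Odin frame receiver " ++ PySem.Int.toStr k,
                          "Odin frame processor " ++ PySem.Int.toStr k]) descs
  let lines := (PySem.List.enumerate descs 1).map
    (fun p => "dbpf \"XSP-ODN-" ++ pyFmt02 p.1 ++ ":IOCNAME\" \"" ++ p.2 ++ "\"")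
  let lines := lines ++ ["dbpf \"XSPRESS:IOCNAME\" \"Xspress ADOdin\""]
  PySem.Str.join "\n" lines

-- ===== PRECONDITION & SPEC =====
def Spec_post_IOC_py (num_cards : Int) (out : String) : Prop := out = post_IOC_py_alt num_cards
instance (num_cards : Int) (out : String) : Decidable (Spec_post_IOC_py num_cards out) := by unfold Spec_post_IOC_py; infer_instance

-- ===== CLAIM (what is proved, stated in full; the proofs are below) =====
def Claim_equal_post_IOC_py : Prop := ∀ (num_cards : Int), Dom_post_IOC_py num_cards → Spec_post_IOC_py num_cards (post_IOC_py num_cards)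

-- ===== LEMMAS AND PROOFS =====

def pvHdr : String :=
  "dbpf \"XSP-ODN-01:IOCNAME\" \"Odin server\"\n"
  ++ "dbpf \"XSP-ODN-02:IOCNAME\" \"Odin meta writer\"\n"
  ++ "dbpf \"XSP-ODN-03:IOCNAME\" \"Odin control server\"\n"
  ++ "dbpf \"XSP-ODN-04:IOCNAME\" \"Odin live view\"\n"

def pvStepA (acc : String) (i : Int) : String :=
  (acc ++ ("dbpf \"XSP-ODN-" ++ pyFmt02 (i * 2 + 5) ++ ":IOCNAME\" \"Odin frame receiver "
    ++ PySem.Int.toStr (i + 1) ++ "\"\n"))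
  ++ ("dbpf \"XSP-ODN-" ++ pyFmt02 (i * 2 + 6) ++ ":IOCNAME\" \"Odin frame processor "
    ++ PySem.Int.toStr (i + 1) ++ "\"\n")

def pvBody (n : Int) : String := (PySem.List.pyRange 0 n 1).foldl pvStepA pvHdr

def pvDescs (n : Int) : List String :=
  (PySem.List.pyRange 1 (n + 1) 1).foldl
    (fun acc k => acc ++ ["Odin frame receiver " ++ PySem.Int.toStr k,
                          "Odin frame processor " ++ PySem.Int.toStr k])
    ["Odin server", "Odin meta writer", "Odin control server", "Odin live view"]

def pvFmt (p : Int × String) : String :=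
  "dbpf \"XSP-ODN-" ++ pyFmt02 p.1 ++ ":IOCNAME\" \"" ++ p.2 ++ "\""

def pvFinal : String := "dbpf \"XSPRESS:IOCNAME\" \"Xspress ADOdin\""

lemma a_eq (n : Int) : post_IOC_py n = pvBody n ++ pvFinal := rfl

lemma alt_eq (n : Int) :
    post_IOC_py_alt n
      = PySem.Str.join "\n" ((PySem.List.enumerate (pvDescs n) 1).map pvFmt ++ [pvFinal]) := rfl

lemma chars_join_snoc (sep a : List Char) (l : List (List Char)) (h : l ≠ []) :
    PySem.Chars.join sep (l ++ [a]) = PySem.Chars.join sep l ++ sep ++ a := by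
  induction l with
  | nil => exact absurd rfl h
  | cons x rest ih =>
    cases rest with
    | nil => simp [PySem.Chars.join_cons_cons, PySem.Chars.join_singleton]
    | cons y t =>
      rw [show (x :: y :: t) ++ [a] = x :: y :: (t ++ [a]) from by simp,
        PySem.Chars.join_cons_cons,
        show y :: (t ++ [a]) = (y :: t) ++ [a] from by simp,
        ih (by simp), PySem.Chars.join_cons_cons]
      simp [List.append_assoc]

lemma str_join_snoc (xs : List String) (a : String) (h : xs ≠ []) :
    PySem.Str.join "\n" (xs ++ [a]) = PySem.Str.join "\n" xs ++ "\n" ++ a := by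
  apply String.toList_inj.mp
  simp only [PySem.Str.toList_join, String.toList_append, List.map_append, List.map_cons,
    List.map_nil]
  exact chars_join_snoc _ _ _ (by simpa using h)

lemma descs_snoc (m : Nat) :
    pvDescs ((m : Int) + 1)
      = pvDescs (m : Int)
        ++ ["Odin frame receiver " ++ PySem.Int.toStr ((m : Int) + 1),
            "Odin frame processor " ++ PySem.Int.toStr ((m : Int) + 1)] := by
  unfold pvDescs
  rw [PySem.List.pyRange_one_succ_right (by omega : (1 : Int) ≤ (m : Int) + 1),
    List.foldl_append]
  simp

lemma len_descs (m : Nat) : (pvDescs (m : Int)).length = 4 + 2 * m := by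
  induction m with
  | zero => decide
  | succ m ih =>
    rw [show ((m + 1 : Nat) : Int) = (m : Int) + 1 by push_cast; ring, descs_snoc]
    simp [ih]; omega

lemma loop_inv (m : Nat) :
    pvBody (m : Int)
      = PySem.Str.join "\n" ((PySem.List.enumerate (pvDescs (m : Int)) 1).map pvFmt) ++ "\n" := by
  induction m with
  | zero => decide
  | succ m ih =>
    have hcast : ((m + 1 : Nat) : Int) = (m : Int) + 1 := by push_cast; ring
    have hlines : ((PySem.List.enumerate (pvDescs (m : Int)) 1).map pvFmt) ≠ [] := by
      apply List.ne_nil_of_length_pos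
      simp [PySem.List.length_enumerate, len_descs]
    rw [pvBody, hcast, PySem.List.pyRange_one_succ_right (by omega : (0 : Int) ≤ (m : Int)),
      List.foldl_append]
    simp only [List.foldl_cons, List.foldl_nil]
    have hb : List.foldl pvStepA pvHdr (PySem.List.pyRange 0 (m : Int) 1) = pvBody (m : Int) := rfl
    rw [hb, ih, descs_snoc, PySem.List.enumerate_append, List.map_append]
    have h5 : (1 : Int) + ((pvDescs (m : Int)).length : Int) = (m : Int) * 2 + 5 := by
      rw [len_descs]; push_cast; ring
    simp only [PySem.List.enumerate, List.map_cons, List.map_nil]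
    rw [show ([pvFmt ((1 : Int) + ↑(pvDescs (m : Int)).length,
          "Odin frame receiver " ++ PySem.Int.toStr ((m : Int) + 1)),
        pvFmt ((1 : Int) + ↑(pvDescs (m : Int)).length + 1,
          "Odin frame processor " ++ PySem.Int.toStr ((m : Int) + 1))] : List String)
      = [pvFmt ((m : Int) * 2 + 5, "Odin frame receiver " ++ PySem.Int.toStr ((m : Int) + 1))]
        ++ [pvFmt ((m : Int) * 2 + 6, "Odin frame processor " ++ PySem.Int.toStr ((m : Int) + 1))]
      from by rw [h5]; rw [show (m : Int) * 2 + 5 + 1 = (m : Int) * 2 + 6 by ring]; simp]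
    rw [← List.append_assoc, str_join_snoc _ _ (by simp [hlines]),
      str_join_snoc _ _ hlines]
    simp only [pvStepA, pvFmt]
    apply String.toList_inj.mp
    simp [String.toList_append]

-- ===== VERDICT (by name: the statement is the Claim_ definition above) =====
theorem post_IOC_py_spec : Claim_equal_post_IOC_py := by
  intro n _
  unfold Spec_post_IOC_py
  rw [a_eq, alt_eq]
  by_cases h : n ≤ 0
  · rw [show pvBody n = pvHdr from by
        unfold pvBody; rw [PySem.List.pyRange_one_eq_nil h]; rfl,
      show pvDescs n = ["Odin server", "Odin meta writer", "Odin control server",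
          "Odin live view"] from by
        unfold pvDescs; rw [PySem.List.pyRange_one_eq_nil (by omega : n + 1 ≤ 1)]; rfl]
    decide
  · obtain ⟨m, rfl⟩ : ∃ m : Nat, n = (m : Int) :=
      ⟨n.toNat, (Int.toNat_of_nonneg (by omega)).symm⟩
    have hlines : ((PySem.List.enumerate (pvDescs (m : Int)) 1).map pvFmt) ≠ [] := by
      apply List.ne_nil_of_length_pos
      simp [PySem.List.length_enumerate, len_descs]
    rw [loop_inv, str_join_snoc _ _ hlines]
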